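-- pv_equiv track=rewrite | github.com/JulianChaoul16/Stochastic_Processes_Independent_Study- | OpenNgram.py | _chain_nodes
-- ===== SOURCE A (Python) =====
-- VIZ_FILTER_WORDS = {
--     "the", "a", "an",
--     "and", "but", "or", "nor",
--     "in", "on", "at", "to", "of", "by", "with", "from",
--     "is", "are", "was", "were",
--     "i", "he", "she", "it", "they", "we", "you",
-- }
--
-- def _has_viz_filter(tokens) -> bool:
--     """Return True if every token in the sequence is a VIZ_FILTER_WORD.
--     We only skip a context from the visual if it is *entirely* function words,
--     not merely if it contains one — this keeps more nodes visible."""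
--     return all(t in VIZ_FILTER_WORDS for t in tokens)
--
-- def _context_label(ctx: tuple) -> str:
--     label = " ".join(ctx)
--     return label if len(label) <= 22 else label[:20] + "…"
--
-- def _transition_probs(frequency: dict) -> dict:
--     probs = {}
--     for ctx, nexts in frequency.items():
--         total = sum(nexts.values())
--         probs[ctx] = {w: round(c / total, 3) for w, c in nexts.items()}
--     return probs
--
-- CHAIN_N = 6   # number of nodes in the chain image
--
-- def _chain_nodes(frequency: dict, k: int = CHAIN_N) -> tuple:
--     """
--     Pick k nodes that are guaranteed to all be mutually connected.
--     Prefers contexts that aren't entirely VIZ_FILTER_WORDS so the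
--     graph labels are meaningful, then greedily expands by connectivity.
--     """
--     probs = _transition_probs(frequency)
--     # Rank by out-degree, preferring content-word contexts for readability
--     ranked = sorted(
--         frequency.keys(),
--         key=lambda c: (len(frequency[c]), not _has_viz_filter(c)),
--         reverse=True
--     )
--
--     selected = [ranked[0]]
--     selected_set = {ranked[0]}
--
--     # Build a reverse-lookup: which contexts point TO a given context?
--     # and forward: which contexts does a context point to?
--     def neighbors(ctx):
--         """All contexts reachable from ctx AND contexts that reach ctx."""
--         fwd = set()
--         for w in probs.get(ctx, {}):
--             dst = ctx[1:] + (w,) if len(ctx) > 1 else (w,)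
--             if dst in frequency:
--                 fwd.add(dst)
--         bwd = set()
--         for other in frequency:
--             for w in probs.get(other, {}):
--                 dst = other[1:] + (w,) if len(other) > 1 else (w,)
--                 if dst == ctx:
--                     bwd.add(other)
--         return fwd | bwd
--
--     # Grow the selection by always picking the candidate with the most
--     # connections into the existing set.
--     for _ in range(k - 1):
--         best_ctx, best_score = None, -1
--         for ctx in ranked:
--             if ctx in selected_set:
--                 continue
--             score = sum(1 for n in neighbors(ctx) if n in selected_set)
--             if score > best_score:
--                 best_ctx, best_score = ctx, score
--         if best_ctx is None:
--             break
--         selected.append(best_ctx)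
--         selected_set.add(best_ctx)
--
--     labels = [_context_label(ctx) for ctx in selected]
--     return selected, labels
-- ===== SOURCE B (Python) =====
-- # B: build the bidirectional adjacency once in a single pass over the edges, then run the
-- # greedy growth with incrementally maintained connection counts (no per-candidate rescan).
--
-- VIZ_FILTER_WORDS = {
--     "the", "a", "an",
--     "and", "but", "or", "nor",
--     "in", "on", "at", "to", "of", "by", "with", "from",
--     "is", "are", "was", "were",
--     "i", "he", "she", "it", "they", "we", "you",
-- }
--
-- def _has_viz_filter(tokens) -> bool:
--     return all(t in VIZ_FILTER_WORDS for t in tokens)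
--
-- def _context_label(ctx: tuple) -> str:
--     label = " ".join(ctx)
--     return label if len(label) <= 22 else label[:20] + "…"
--
-- CHAIN_N = 6
--
-- def _chain_nodes(frequency: dict, k: int = CHAIN_N) -> tuple:
--     # adjacency (forward OR backward neighbours) of every context, built once
--     adj = {c: set() for c in frequency}
--     for src, nexts in frequency.items():
--         for w in nexts:
--             dst = src[1:] + (w,) if len(src) > 1 else (w,)
--             if dst in adj:
--                 adj[src].add(dst)
--                 adj[dst].add(src)
--
--     ranked = sorted(
--         frequency.keys(),
--         key=lambda c: (len(frequency[c]), not _has_viz_filter(c)),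
--         reverse=True
--     )
--
--     first = ranked[0]
--     selected = [first]
--     selected_set = {first}
--     # scores[c] = number of neighbours of c already selected, kept up to date
--     scores = {c: 0 for c in frequency}
--     for n in adj[first]:
--         scores[n] += 1
--
--     for _ in range(k - 1):
--         best_ctx, best_score = None, -1
--         for ctx in ranked:
--             if ctx in selected_set:
--                 continue
--             if scores[ctx] > best_score:
--                 best_ctx, best_score = ctx, scores[ctx]
--         if best_ctx is None:
--             break
--         selected.append(best_ctx)
--         selected_set.add(best_ctx)
--         for n in adj[best_ctx]:
--             scores[n] += 1
--
--     labels = [_context_label(c) for c in selected]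
--     return selected, labels
-- ===== Notes on version B (the rewrite author's own statement) =====
-- stated objective: faster
-- what changed: B builds the bidirectional adjacency of every context once in a single pass over the edges and maintains each candidate's count of already-selected neighbours incrementally, instead of recomputing a candidate's neighbour set (including a full backward scan of all contexts) for every candidate in every greedy round.
import Mathlib
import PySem

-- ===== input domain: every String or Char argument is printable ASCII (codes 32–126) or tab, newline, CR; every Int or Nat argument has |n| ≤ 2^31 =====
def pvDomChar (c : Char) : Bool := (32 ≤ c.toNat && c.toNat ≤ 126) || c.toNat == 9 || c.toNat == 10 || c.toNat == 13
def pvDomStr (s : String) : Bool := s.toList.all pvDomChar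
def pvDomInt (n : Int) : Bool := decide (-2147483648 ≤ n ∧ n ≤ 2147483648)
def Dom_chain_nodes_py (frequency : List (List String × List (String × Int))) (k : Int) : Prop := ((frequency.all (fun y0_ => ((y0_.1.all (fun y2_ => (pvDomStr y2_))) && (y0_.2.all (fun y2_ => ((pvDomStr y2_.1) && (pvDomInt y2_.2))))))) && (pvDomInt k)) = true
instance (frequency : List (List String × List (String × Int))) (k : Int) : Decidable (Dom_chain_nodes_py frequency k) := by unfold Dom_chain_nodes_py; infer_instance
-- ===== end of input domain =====

-- B builds the forward+backward adjacency once and keeps greedy connection counts updated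
-- incrementally, instead of re-deriving each candidate's neighbour set in every round (objective: faster).
-- Both ports model the Python dict arguments by folding the association lists through dict insertion.

-- ===== PORT A =====
-- shared helpers: module constants, the dict normalisation of the arguments, label/shift, ranking

def pvVizWords : List String :=
  ["the", "a", "an", "and", "but", "or", "nor", "in", "on", "at", "to", "of", "by", "with", "from",
   "is", "are", "was", "were", "i", "he", "she", "it", "they", "we", "you"]

def pvHasViz (tokens : List String) : Bool := tokens.all (fun t => pvVizWords.contains t)

def pvLabel (ctx : List String) : String :=
  let label := PySem.Str.join " " ctx
  if PySem.Str.len label ≤ 22 then label else PySem.Str.slice label none (some 20) ++ "…"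

-- ctx[1:] + (w,) if len(ctx) > 1 else (w,)
def pvShift (ctx : List String) (w : String) : List String :=
  if ctx.length > 1 then PySem.List.slice ctx (some 1) none ++ [w] else [w]

-- the Python dict arguments: association lists folded through dict insertion (last value wins)
def pvInnerDict (n : List (String × Int)) : PySem.Dict String Int :=
  n.foldl (fun d q => d.insert q.1 q.2) PySem.Dict.empty

def pvFreq (frequency : List (List String × List (String × Int))) :
    PySem.Dict (List String) (PySem.Dict String Int) :=
  frequency.foldl (fun d p => d.insert p.1 (pvInnerDict p.2)) PySem.Dict.empty

-- sorted(frequency.keys(), key=lambda c: (len(frequency[c]), not _has_viz_filter(c)), reverse=True)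
def pvRanked (freq : PySem.Dict (List String) (PySem.Dict String Int)) : List (List String) :=
  PySem.List.sorted2 freq.keys
    (fun c => ((freq.getD c PySem.Dict.empty).size : Int)) (fun c => !pvHasViz c) true

-- _transition_probs: the float probabilities are never read downstream (only each inner dict's
-- KEY list is iterated, and the zero-total division is excluded by Pre_), so the port keeps,
-- per context, exactly the key list of its inner dict — loop structure unchanged.
def pvProbs (freq : PySem.Dict (List String) (PySem.Dict String Int)) :
    PySem.Dict (List String) (List String) :=
  freq.items.foldl (fun d p => d.insert p.1 p.2.keys) PySem.Dict.empty

-- neighbors(ctx) = fwd | bwd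
def pvNeighbors (freq : PySem.Dict (List String) (PySem.Dict String Int))
    (probs : PySem.Dict (List String) (List String)) (ctx : List String) :
    PySem.Set (List String) :=
  let fwd := (probs.getD ctx []).foldl
    (fun s w => let dst := pvShift ctx w; if freq.contains dst then PySem.Set.add s dst else s)
    PySem.Set.empty
  let bwd := freq.keys.foldl
    (fun s other => (probs.getD other []).foldl
      (fun s w => if pvShift other w == ctx then PySem.Set.add s other else s) s)
    PySem.Set.empty
  PySem.Set.union fwd bwd

-- the inner candidate scan of one greedy round
def pvBestA (freq : PySem.Dict (List String) (PySem.Dict String Int))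
    (probs : PySem.Dict (List String) (List String)) (ranked : List (List String))
    (selSet : PySem.Set (List String)) : Option (List String) × Int :=
  ranked.foldl (fun best ctx =>
    if PySem.Set.contains selSet ctx then best
    else
      let score : Int :=
        ((pvNeighbors freq probs ctx).countP (fun n => PySem.Set.contains selSet n) : Int)
      if best.2 < score then (some ctx, score) else best)
    (none, -1)

-- for _ in range(k-1): … (break when no candidate remains)
def pvLoopA (freq : PySem.Dict (List String) (PySem.Dict String Int))
    (probs : PySem.Dict (List String) (List String)) (ranked : List (List String)) :
    Nat → List (List String) → PySem.Set (List String) → List (List String)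
  | 0, sel, _ => sel
  | fuel + 1, sel, selSet =>
    match (pvBestA freq probs ranked selSet).1 with
    | none => sel
    | some b => pvLoopA freq probs ranked fuel (sel ++ [b]) (PySem.Set.add selSet b)

def chain_nodes_py (frequency : List (List String × List (String × Int))) (k : Int) :
    List (List String) × List String :=
  let freq := pvFreq frequency
  let probs := pvProbs freq
  let ranked := pvRanked freq
  match ranked with
  | [] => ([], [])  -- empty frequency: Python raises IndexError at ranked[0]; excluded by Pre_
  | r0 :: _ =>
    let sel := pvLoopA freq probs ranked (k - 1).toNat [r0] (PySem.Set.add PySem.Set.empty r0)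
    (sel, sel.map pvLabel)

-- ===== PORT B =====

-- adj = {c: set() for c in frequency}; one pass over all edges, adding both directions
def pvAdj (freq : PySem.Dict (List String) (PySem.Dict String Int)) :
    PySem.Dict (List String) (PySem.Set (List String)) :=
  let adj0 := freq.keys.foldl (fun d c => d.insert c PySem.Set.empty) PySem.Dict.empty
  freq.items.foldl (fun adj p =>
    p.2.keys.foldl (fun adj w =>
      let dst := pvShift p.1 w
      if adj.contains dst then
        (adj.modify p.1 PySem.Set.empty (fun s => PySem.Set.add s dst)).modify dst
          PySem.Set.empty (fun s => PySem.Set.add s p.1)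
      else adj) adj) adj0

-- scores = {c: 0 for c in frequency}
def pvScores0 (freq : PySem.Dict (List String) (PySem.Dict String Int)) :
    PySem.Dict (List String) Int :=
  freq.keys.foldl (fun d c => d.insert c 0) PySem.Dict.empty

-- for n in adj[b]: scores[n] += 1   (scores is only ever looked up afterwards, never iterated)
def pvBump (scores : PySem.Dict (List String) Int) (ns : PySem.Set (List String)) :
    PySem.Dict (List String) Int :=
  ns.foldl (fun d n => d.modify n 0 (· + 1)) scores

-- the inner candidate scan of one greedy round: a plain lookup of the maintained count
def pvBestB (ranked : List (List String)) (scores : PySem.Dict (List String) Int)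
    (selSet : PySem.Set (List String)) : Option (List String) × Int :=
  ranked.foldl (fun best ctx =>
    if PySem.Set.contains selSet ctx then best
    else if best.2 < scores.getD ctx 0 then (some ctx, scores.getD ctx 0) else best)
    (none, -1)

def pvLoopB (adj : PySem.Dict (List String) (PySem.Set (List String)))
    (ranked : List (List String)) :
    Nat → List (List String) → PySem.Set (List String) → PySem.Dict (List String) Int →
    List (List String)
  | 0, sel, _, _ => sel
  | fuel + 1, sel, selSet, scores =>
    match (pvBestB ranked scores selSet).1 with
    | none => sel
    | some b =>
      pvLoopB adj ranked fuel (sel ++ [b]) (PySem.Set.add selSet b)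
        (pvBump scores (adj.getD b PySem.Set.empty))

def chain_nodes_py_alt (frequency : List (List String × List (String × Int))) (k : Int) :
    List (List String) × List String :=
  let freq := pvFreq frequency
  let adj := pvAdj freq
  let ranked := pvRanked freq
  match ranked with
  | [] => ([], [])
  | r0 :: _ =>
    let sel := pvLoopB adj ranked (k - 1).toNat [r0] (PySem.Set.add PySem.Set.empty r0)
      (pvBump (pvScores0 freq) (adj.getD r0 PySem.Set.empty))
    (sel, sel.map pvLabel)

-- ===== PRECONDITION & SPEC =====
-- Pre_: frequency is nonempty (A indexes ranked[0]: IndexError on {}) and every context of the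
-- dict represented by `frequency` has a nonzero total count (A divides by it: ZeroDivisionError).
def Pre_chain_nodes_py (frequency : List (List String × List (String × Int))) (k : Int) : Prop :=
  frequency ≠ [] ∧
    ∀ p ∈ (frequency.foldl (fun d x => d.insert x.1 x.2)
        (PySem.Dict.empty : PySem.Dict (List String) (List (String × Int)))).items,
      p.2 = [] ∨
        (p.2.foldl (fun d q => d.insert q.1 q.2)
          (PySem.Dict.empty : PySem.Dict String Int)).values.sum ≠ 0
instance (frequency : List (List String × List (String × Int))) (k : Int) : Decidable (Pre_chain_nodes_py frequency k) := by unfold Pre_chain_nodes_py; infer_instance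

def pvWitness_chain_nodes_py : (List (List String × List (String × Int))) × Int :=
  ([(["hi"], [("yo", 1)]), (["yo"], [("hi", 2), ("yo", 1)])], 3)

def Spec_chain_nodes_py (frequency : List (List String × List (String × Int))) (k : Int) (out : List (List String) × List String) : Prop := out = chain_nodes_py_alt frequency k
instance (frequency : List (List String × List (String × Int))) (k : Int) (out : List (List String) × List String) : Decidable (Spec_chain_nodes_py frequency k out) := by unfold Spec_chain_nodes_py; infer_instance

-- ===== CLAIM (what is proved, stated in full; the proofs are below) =====
def Claim_equal_chain_nodes_py : Prop := ∀ (frequency : List (List String × List (String × Int))) (k : Int), Dom_chain_nodes_py frequency k → Pre_chain_nodes_py frequency k → Spec_chain_nodes_py frequency k (chain_nodes_py frequency k)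


-- ===== LEMMAS AND PROOFS =====

-- ---- association-list facts ----
lemma pv_find?_of_mem {K V : Type} [BEq K] [LawfulBEq K] {l : List (K × V)}
    (h : (l.map (fun x => x.1)).Nodup) {p : K × V} (hp : p ∈ l) :
    l.find? (fun q => q.1 == p.1) = some p := by
  induction l with
  | nil => cases hp
  | cons a t ih =>
    simp only [List.map_cons, List.nodup_cons] at h
    rcases List.mem_cons.1 hp with rfl | hp'
    · simp [List.find?]
    · have hne : (a.1 == p.1) = false := by
        rw [beq_eq_false_iff_ne]
        intro he
        exact h.1 (he ▸ List.mem_map.2 ⟨p, hp', rfl⟩)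
      simp only [List.find?, hne]
      exact ih h.2 hp'

lemma pv_find?_eq_none {K V : Type} [BEq K] [LawfulBEq K] {l : List (K × V)} {c : K}
    (h : c ∉ l.map (fun x => x.1)) : l.find? (fun q => q.1 == c) = none := by
  induction l with
  | nil => rfl
  | cons a t ih =>
    simp only [List.map_cons, List.mem_cons, not_or] at h
    have hne : (a.1 == c) = false := by
      rw [beq_eq_false_iff_ne]
      exact fun he => h.1 he.symm
    simp only [List.find?, hne]
    exact ih h.2

lemma pv_get?_of_mem {K V : Type} [BEq K] [LawfulBEq K] (d : PySem.Dict K V)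
    (h : d.keys.Nodup) {p : K × V} (hp : p ∈ d.items) : d.get? p.1 = some p.2 := by
  have := pv_find?_of_mem (l := d.items) (by simpa [PySem.Dict.keys] using h) hp
  simp [PySem.Dict.get?, this]

lemma pv_contains_iff {K V : Type} [BEq K] [LawfulBEq K] (d : PySem.Dict K V) (z : K) :
    d.contains z = true ↔ z ∈ d.keys := by
  simp only [PySem.Dict.contains, PySem.Dict.keys, List.any_eq_true, List.mem_map, beq_iff_eq]

-- ---- set-fold membership ----
lemma pv_mem_foldl_addIf {A B : Type} [BEq A] [LawfulBEq A] (l : List B) (P : B → Bool)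
    (f : B → A) : ∀ (s0 : PySem.Set A) (x : A),
    (x ∈ l.foldl (fun s w => if P w then PySem.Set.add s (f w) else s) s0 ↔
      x ∈ s0 ∨ ∃ w ∈ l, P w = true ∧ f w = x) := by
  induction l with
  | nil => simp
  | cons a t ih =>
    intro s0 x
    simp only [List.foldl_cons]
    by_cases h : P a = true
    · rw [if_pos h, ih]
      simp only [PySem.Set.mem_add, List.mem_cons]
      constructor
      · rintro (( hs | rfl) | ⟨w, hw, hpw, rfl⟩)
        · exact Or.inl hs
        · exact Or.inr ⟨a, Or.inl rfl, h, rfl⟩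
        · exact Or.inr ⟨w, Or.inr hw, hpw, rfl⟩
      · rintro (hs | ⟨w, (rfl | hw), hpw, rfl⟩)
        · exact Or.inl (Or.inl hs)
        · exact Or.inl (Or.inr rfl)
        · exact Or.inr ⟨w, hw, hpw, rfl⟩
    · rw [if_neg h, ih]
      simp only [List.mem_cons]
      constructor
      · rintro (hs | ⟨w, hw, hpw, rfl⟩)
        · exact Or.inl hs
        · exact Or.inr ⟨w, Or.inr hw, hpw, rfl⟩
      · rintro (hs | ⟨w, (rfl | hw), hpw, rfl⟩)
        · exact Or.inl hs
        · exact absurd hpw h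
        · exact Or.inr ⟨w, hw, hpw, rfl⟩

lemma pv_nodup_foldl_addIf {A B : Type} [BEq A] [LawfulBEq A] (l : List B) (P : B → Bool)
    (f : B → A) : ∀ (s0 : PySem.Set A), s0.Nodup →
    (l.foldl (fun s w => if P w then PySem.Set.add s (f w) else s) s0).Nodup := by
  induction l with
  | nil => exact fun s0 h => h
  | cons a t ih =>
    intro s0 h
    simp only [List.foldl_cons]
    by_cases hp : P a = true
    · rw [if_pos hp]; exact ih _ (PySem.Set.nodup_add _ _ h)
    · rw [if_neg hp]; exact ih _ h

lemma pv_mem_foldl_nested {A B C : Type} [BEq A] [LawfulBEq A] (l : List B) (g : B → List C)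
    (P : B → C → Bool) (f : B → A) : ∀ (s0 : PySem.Set A) (x : A),
    (x ∈ l.foldl (fun s o => (g o).foldl (fun s w => if P o w then PySem.Set.add s (f o) else s) s) s0 ↔
      x ∈ s0 ∨ ∃ o ∈ l, (∃ w ∈ g o, P o w = true) ∧ f o = x) := by
  induction l with
  | nil => simp
  | cons a t ih =>
    intro s0 x
    simp only [List.foldl_cons]
    rw [ih]
    rw [pv_mem_foldl_addIf (A := A) (B := C) (g a) (fun w => P a w) (fun _ => f a) s0 x]
    simp only [List.mem_cons]
    constructor
    · rintro ((hs | ⟨w, hw, hpw, rfl⟩) | ⟨o, ho, hws, rfl⟩)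
      · exact Or.inl hs
      · exact Or.inr ⟨a, Or.inl rfl, ⟨w, hw, hpw⟩, rfl⟩
      · exact Or.inr ⟨o, Or.inr ho, hws, rfl⟩
    · rintro (hs | ⟨o, (rfl | ho), ⟨w, hw, hpw⟩, rfl⟩)
      · exact Or.inl (Or.inl hs)
      · exact Or.inl (Or.inr ⟨w, hw, hpw, rfl⟩)
      · exact Or.inr ⟨o, ho, ⟨w, hw, hpw⟩, rfl⟩

lemma pv_probs_items (d : PySem.Dict (List String) (PySem.Dict String Int))
    (hnd : d.keys.Nodup) :
    (pvProbs d).items = d.items.map (fun p => (p.1, p.2.keys)) := by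
  unfold pvProbs
  rw [PySem.Dict.items_foldl_insert_fresh d.items (fun p => p.1) (fun p => p.2.keys)
    PySem.Dict.empty (fun a _ => rfl) (by simpa [PySem.Dict.keys] using hnd)]
  rfl

lemma pv_probs_getD (d : PySem.Dict (List String) (PySem.Dict String Int))
    (hnd : d.keys.Nodup) {p : List String × PySem.Dict String Int} (hp : p ∈ d.items) :
    (pvProbs d).getD p.1 [] = p.2.keys := by
  have hmem : ((p.1, p.2.keys) : List String × List String) ∈
      d.items.map (fun p => (p.1, p.2.keys)) := List.mem_map.2 ⟨p, hp, rfl⟩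
  have hmnd : ((d.items.map (fun p => (p.1, p.2.keys))).map (fun x => x.1)).Nodup := by
    rw [List.map_map]
    simpa [PySem.Dict.keys, Function.comp] using hnd
  have := pv_find?_of_mem hmnd hmem
  simp [PySem.Dict.getD, PySem.Dict.get?, pv_probs_items d hnd, this]

lemma pv_probs_getD_of_not_mem (d : PySem.Dict (List String) (PySem.Dict String Int))
    (hnd : d.keys.Nodup) {c : List String} (hc : c ∉ d.keys) :
    (pvProbs d).getD c [] = [] := by
  have : c ∉ (d.items.map (fun p => (p.1, p.2.keys))).map (fun x => x.1) := by
    rw [List.map_map]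
    simpa [PySem.Dict.keys, Function.comp] using hc
  simp [PySem.Dict.getD, PySem.Dict.get?, pv_probs_items d hnd, pv_find?_eq_none this]

-- ---- the edge relation and the neighbour characterisations ----
def pvE (d : PySem.Dict (List String) (PySem.Dict String Int)) (c x : List String) : Prop :=
  ∃ p ∈ d.items, p.1 = c ∧ ∃ w ∈ p.2.keys, pvShift c w = x

lemma pv_mem_neighbors (d : PySem.Dict (List String) (PySem.Dict String Int))
    (hnd : d.keys.Nodup) (c : List String) (x : List String) :
    x ∈ pvNeighbors d (pvProbs d) c ↔
      (pvE d c x ∧ x ∈ d.keys) ∨ pvE d x c := by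
  unfold pvNeighbors
  rw [PySem.Set.mem_union]
  rw [pv_mem_foldl_addIf ((pvProbs d).getD c []) (fun w => d.contains (pvShift c w))
    (fun w => pvShift c w) PySem.Set.empty x]
  rw [pv_mem_foldl_nested d.keys (fun o => (pvProbs d).getD o [])
    (fun o w => pvShift o w == c) (fun o => o) PySem.Set.empty x]
  simp only [PySem.Set.empty, List.not_mem_nil, false_or, beq_iff_eq]
  constructor
  · rintro (⟨w, hw, hcont, rfl⟩ | ⟨o, ho, ⟨w, hw, hsh⟩, rfl⟩)
    · by_cases hc : c ∈ d.keys
      · obtain ⟨p, hp, hpe⟩ := List.mem_map.1 hc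
        rw [← hpe, pv_probs_getD d hnd hp] at hw
        exact Or.inl ⟨⟨p, hp, hpe, w, hw, rfl⟩, (pv_contains_iff d _).1 hcont⟩
      · rw [pv_probs_getD_of_not_mem d hnd hc] at hw
        cases hw
    · obtain ⟨p, hp, hpe⟩ := List.mem_map.1 ho
      rw [← hpe, pv_probs_getD d hnd hp] at hw
      exact Or.inr ⟨p, hp, hpe, w, hw, hsh⟩
  · rintro (⟨⟨p, hp, hpe, w, hw, hsh⟩, hx⟩ | ⟨p, hp, hpe, w, hw, hsh⟩)
    · refine Or.inl ⟨w, ?_, ?_, hsh⟩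
      · rw [← hpe] at hsh ⊢
        rw [pv_probs_getD d hnd hp]
        exact hw
      · rw [hsh]; exact (pv_contains_iff d _).2 hx
    · refine Or.inr ⟨p.1, List.mem_map.2 ⟨p, hp, rfl⟩, ⟨w, ?_, ?_⟩, hpe⟩
      · rw [pv_probs_getD d hnd hp]; exact hw
      · rw [hpe]; exact hsh

lemma pv_nodup_neighbors (d : PySem.Dict (List String) (PySem.Dict String Int))
    (probs : PySem.Dict (List String) (List String)) (c : List String) :
    (pvNeighbors d probs c).Nodup := by
  unfold pvNeighbors
  apply PySem.Set.nodup_union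
  exact pv_nodup_foldl_addIf _ _ _ _ List.nodup_nil


-- ---- the adjacency dict of B ----
def pvAdjStep (a : List String) (adj : PySem.Dict (List String) (PySem.Set (List String)))
    (w : String) : PySem.Dict (List String) (PySem.Set (List String)) :=
  let dst := pvShift a w
  if adj.contains dst then
    (adj.modify a PySem.Set.empty (fun s => PySem.Set.add s dst)).modify dst
      PySem.Set.empty (fun s => PySem.Set.add s a)
  else adj

def pvAdj0 (d : PySem.Dict (List String) (PySem.Dict String Int)) :
    PySem.Dict (List String) (PySem.Set (List String)) :=
  d.keys.foldl (fun e c => e.insert c PySem.Set.empty) PySem.Dict.empty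

lemma pv_adj_eq (d : PySem.Dict (List String) (PySem.Dict String Int)) :
    pvAdj d = d.items.foldl (fun adj p => p.2.keys.foldl (pvAdjStep p.1) adj) (pvAdj0 d) := rfl

lemma pv_adj_step_char (d : PySem.Dict (List String) (PySem.Dict String Int))
    (a : List String) (ha : a ∈ d.keys) (w : String)
    (adj : PySem.Dict (List String) (PySem.Set (List String)))
    (hc : ∀ z, adj.contains z = decide (z ∈ d.keys)) :
    (∀ z, (pvAdjStep a adj w).contains z = decide (z ∈ d.keys)) ∧
    ((∀ z, (adj.getD z PySem.Set.empty).Nodup) →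
      ∀ z, ((pvAdjStep a adj w).getD z PySem.Set.empty).Nodup) ∧
    (∀ c x, x ∈ (pvAdjStep a adj w).getD c PySem.Set.empty ↔
      x ∈ adj.getD c PySem.Set.empty ∨
        ((c = a ∧ pvShift a w = x ∧ x ∈ d.keys) ∨ (x = a ∧ pvShift a w = c ∧ c ∈ d.keys))) := by
  by_cases hdst : pvShift a w ∈ d.keys
  · have hcont : adj.contains (pvShift a w) = true := by rw [hc]; simp [hdst]
    have hstep : pvAdjStep a adj w =
        (adj.modify a PySem.Set.empty (fun s => PySem.Set.add s (pvShift a w))).modify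
          (pvShift a w) PySem.Set.empty (fun s => PySem.Set.add s a) := by
      unfold pvAdjStep
      simp only [hcont, if_true]
    have hgetD : ∀ c, (pvAdjStep a adj w).getD c PySem.Set.empty =
        if c = pvShift a w then
          PySem.Set.add (if pvShift a w = a then
              PySem.Set.add (adj.getD a PySem.Set.empty) (pvShift a w)
            else adj.getD (pvShift a w) PySem.Set.empty) a
        else if c = a then PySem.Set.add (adj.getD a PySem.Set.empty) (pvShift a w)
        else adj.getD c PySem.Set.empty := by
      intro c
      rw [hstep]
      simp only [PySem.Dict.modify, PySem.Dict.getD_insert]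
    refine ⟨?_, ?_, ?_⟩
    · intro z
      rw [hstep]
      simp only [PySem.Dict.modify, PySem.Dict.contains_insert, hc]
      by_cases h1 : z = pvShift a w
      · subst h1
        simp [hdst]
      · by_cases h2 : z = a
        · subst h2
          simp [ha]
        · have b1 : (z == pvShift a w) = false := by rw [beq_eq_false_iff_ne]; exact h1
          have b2 : (z == a) = false := by rw [beq_eq_false_iff_ne]; exact h2
          simp [b1, b2]
    · intro hnd z
      rw [hgetD z]
      split_ifs with h1 h2 h3
      · exact PySem.Set.nodup_add _ _ (PySem.Set.nodup_add _ _ (hnd a))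
      · exact PySem.Set.nodup_add _ _ (hnd _)
      · exact PySem.Set.nodup_add _ _ (hnd a)
      · exact hnd z
    · intro c x
      rw [hgetD c]
      split_ifs with h1 h2 h3
      · subst h1
        simp only [PySem.Set.mem_add]
        aesop
      · subst h1
        simp only [PySem.Set.mem_add]
        aesop
      · subst h3
        simp only [PySem.Set.mem_add]
        aesop
      · aesop
  · have hcont : adj.contains (pvShift a w) = false := by rw [hc]; simp [hdst]
    have hstep : pvAdjStep a adj w = adj := by
      unfold pvAdjStep
      simp only [hcont]
      rfl
    rw [hstep]
    refine ⟨hc, fun h => h, ?_⟩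
    intro c x
    constructor
    · exact fun hm => Or.inl hm
    · rintro (hm | (⟨hce, hsx, hxk⟩ | ⟨hxa, hsc, hck⟩))
      · exact hm
      · exact absurd (hsx ▸ hxk) hdst
      · exact absurd (hsc ▸ hck) hdst

lemma pv_adj_inner_char (d : PySem.Dict (List String) (PySem.Dict String Int))
    (a : List String) (ha : a ∈ d.keys) (ws : List String) :
    ∀ (adj : PySem.Dict (List String) (PySem.Set (List String))),
    (∀ z, adj.contains z = decide (z ∈ d.keys)) →
    (∀ z, ((ws.foldl (pvAdjStep a) adj).contains z = decide (z ∈ d.keys))) ∧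
    ((∀ z, (adj.getD z PySem.Set.empty).Nodup) →
      ∀ z, ((ws.foldl (pvAdjStep a) adj).getD z PySem.Set.empty).Nodup) ∧
    (∀ c x, x ∈ (ws.foldl (pvAdjStep a) adj).getD c PySem.Set.empty ↔
      x ∈ adj.getD c PySem.Set.empty ∨
        ∃ w ∈ ws, (c = a ∧ pvShift a w = x ∧ x ∈ d.keys) ∨
          (x = a ∧ pvShift a w = c ∧ c ∈ d.keys)) := by
  induction ws with
  | nil => exact fun adj hc => ⟨hc, fun h => h, by simp⟩
  | cons w ws ih =>
    intro adj hc
    obtain ⟨sc, sn, sm⟩ := pv_adj_step_char d a ha w adj hc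
    obtain ⟨ic, inn, im⟩ := ih (pvAdjStep a adj w) sc
    refine ⟨ic, fun h => inn (sn h), ?_⟩
    intro c x
    rw [List.foldl_cons] at *
    rw [im c x, sm c x]
    simp only [List.mem_cons]
    constructor
    · rintro ((hm | hw) | ⟨w', hw', hd⟩)
      · exact Or.inl hm
      · exact Or.inr ⟨w, Or.inl rfl, hw⟩
      · exact Or.inr ⟨w', Or.inr hw', hd⟩
    · rintro (hm | ⟨w', (rfl | hw'), hd⟩)
      · exact Or.inl (Or.inl hm)
      · exact Or.inl (Or.inr hd)
      · exact Or.inr ⟨w', hw', hd⟩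

lemma pv_adj_outer_char (d : PySem.Dict (List String) (PySem.Dict String Int))
    (es : List (List String × PySem.Dict String Int)) (hes : ∀ p ∈ es, p.1 ∈ d.keys) :
    ∀ (adj : PySem.Dict (List String) (PySem.Set (List String))),
    (∀ z, adj.contains z = decide (z ∈ d.keys)) →
    (∀ z, ((es.foldl (fun adj p => p.2.keys.foldl (pvAdjStep p.1) adj) adj).contains z = decide (z ∈ d.keys))) ∧
    ((∀ z, (adj.getD z PySem.Set.empty).Nodup) →
      ∀ z, ((es.foldl (fun adj p => p.2.keys.foldl (pvAdjStep p.1) adj) adj).getD z PySem.Set.empty).Nodup) ∧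
    (∀ c x, x ∈ (es.foldl (fun adj p => p.2.keys.foldl (pvAdjStep p.1) adj) adj).getD c PySem.Set.empty ↔
      x ∈ adj.getD c PySem.Set.empty ∨
        ∃ p ∈ es, ∃ w ∈ p.2.keys, (c = p.1 ∧ pvShift p.1 w = x ∧ x ∈ d.keys) ∨
          (x = p.1 ∧ pvShift p.1 w = c ∧ c ∈ d.keys)) := by
  induction es with
  | nil => exact fun adj hc => ⟨hc, fun h => h, by simp⟩
  | cons p es ih =>
    intro adj hc
    have hp1 : p.1 ∈ d.keys := hes p (List.mem_cons_self ..)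
    obtain ⟨sc, sn, sm⟩ := pv_adj_inner_char d p.1 hp1 p.2.keys adj hc
    obtain ⟨ic, inn, im⟩ := ih (fun q hq => hes q (List.mem_cons_of_mem _ hq)) _ sc
    refine ⟨ic, fun h => inn (sn h), ?_⟩
    intro c x
    rw [List.foldl_cons] at *
    rw [im c x, sm c x]
    simp only [List.mem_cons]
    constructor
    · rintro ((hm | ⟨w, hw, hd⟩) | ⟨q, hq, hd⟩)
      · exact Or.inl hm
      · exact Or.inr ⟨p, Or.inl rfl, w, hw, hd⟩
      · exact Or.inr ⟨q, Or.inr hq, hd⟩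
    · rintro (hm | ⟨q, (rfl | hq), hd⟩)
      · exact Or.inl (Or.inl hm)
      · exact Or.inl (Or.inr hd)
      · exact Or.inr ⟨q, hq, hd⟩

lemma pv_adj0_items (d : PySem.Dict (List String) (PySem.Dict String Int))
    (hnd : d.keys.Nodup) : (pvAdj0 d).items = d.keys.map (fun c => (c, PySem.Set.empty)) := by
  unfold pvAdj0
  rw [PySem.Dict.items_foldl_insert_fresh d.keys (fun c => c) (fun _ => PySem.Set.empty)
    PySem.Dict.empty (fun a _ => rfl) (by simpa using hnd)]
  rfl

lemma pv_adj0_keys (d : PySem.Dict (List String) (PySem.Dict String Int))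
    (hnd : d.keys.Nodup) : (pvAdj0 d).keys = d.keys := by
  simp [PySem.Dict.keys, pv_adj0_items d hnd, List.map_map, Function.comp]

lemma pv_adj0_contains (d : PySem.Dict (List String) (PySem.Dict String Int))
    (hnd : d.keys.Nodup) (z : List String) : (pvAdj0 d).contains z = decide (z ∈ d.keys) := by
  by_cases hz : z ∈ d.keys
  · simp only [hz, decide_true]
    exact (pv_contains_iff _ z).2 ((pv_adj0_keys d hnd) ▸ hz)
  · simp only [hz, decide_false]
    rw [← Bool.not_eq_true]
    intro hcontra
    exact hz ((pv_adj0_keys d hnd) ▸ (pv_contains_iff _ z).1 hcontra)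

lemma pv_adj0_getD (d : PySem.Dict (List String) (PySem.Dict String Int))
    (hnd : d.keys.Nodup) (z : List String) :
    (pvAdj0 d).getD z PySem.Set.empty = PySem.Set.empty := by
  have hitems := pv_adj0_items d hnd
  by_cases hz : z ∈ d.keys
  · have hmem : ((z, PySem.Set.empty) : List String × PySem.Set (List String)) ∈
        (pvAdj0 d).items := by
      rw [hitems]; exact List.mem_map.2 ⟨z, hz, rfl⟩
    have hknd : (pvAdj0 d).keys.Nodup := by rw [pv_adj0_keys d hnd]; exact hnd
    have := pv_get?_of_mem (pvAdj0 d) hknd hmem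
    simp [PySem.Dict.getD, this]
  · have hzk : z ∉ (pvAdj0 d).items.map (fun x => x.1) := by
      rw [hitems, List.map_map]
      simpa [Function.comp] using hz
    have := pv_find?_eq_none (l := (pvAdj0 d).items) (c := z) hzk
    simp [PySem.Dict.getD, PySem.Dict.get?, this]

lemma pv_mem_adj (d : PySem.Dict (List String) (PySem.Dict String Int))
    (hnd : d.keys.Nodup) (c x : List String) :
    x ∈ (pvAdj d).getD c PySem.Set.empty ↔
      (pvE d c x ∧ x ∈ d.keys) ∨ (pvE d x c ∧ c ∈ d.keys) := by
  obtain ⟨-, -, hm⟩ := pv_adj_outer_char d d.items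
    (fun p hp => List.mem_map.2 ⟨p, hp, rfl⟩) (pvAdj0 d) (pv_adj0_contains d hnd)
  rw [pv_adj_eq, hm c x, pv_adj0_getD d hnd c]
  simp only [PySem.Set.empty, List.not_mem_nil, false_or]
  unfold pvE
  constructor
  · rintro ⟨p, hp, w, hw, (⟨rfl, hsx, hxk⟩ | ⟨rfl, hsc, hck⟩)⟩
    · exact Or.inl ⟨⟨p, hp, rfl, w, hw, hsx⟩, hxk⟩
    · exact Or.inr ⟨⟨p, hp, rfl, w, hw, hsc⟩, hck⟩
  · rintro (⟨⟨p, hp, rfl, w, hw, hsx⟩, hxk⟩ | ⟨⟨p, hp, rfl, w, hw, hsc⟩, hck⟩)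
    · exact ⟨p, hp, w, hw, Or.inl ⟨rfl, hsx, hxk⟩⟩
    · exact ⟨p, hp, w, hw, Or.inr ⟨rfl, hsc, hck⟩⟩

lemma pv_adj_nodup (d : PySem.Dict (List String) (PySem.Dict String Int))
    (hnd : d.keys.Nodup) (c : List String) : ((pvAdj d).getD c PySem.Set.empty).Nodup := by
  obtain ⟨-, hn, -⟩ := pv_adj_outer_char d d.items
    (fun p hp => List.mem_map.2 ⟨p, hp, rfl⟩) (pvAdj0 d) (pv_adj0_contains d hnd)
  rw [pv_adj_eq]
  exact hn (fun z => by rw [pv_adj0_getD d hnd z]; exact List.nodup_nil) c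

lemma pv_adj_symm (d : PySem.Dict (List String) (PySem.Dict String Int))
    (hnd : d.keys.Nodup) (b c : List String) :
    b ∈ (pvAdj d).getD c PySem.Set.empty ↔ c ∈ (pvAdj d).getD b PySem.Set.empty := by
  rw [pv_mem_adj d hnd, pv_mem_adj d hnd]
  exact Or.comm

lemma pv_adj_perm_neighbors (d : PySem.Dict (List String) (PySem.Dict String Int))
    (hnd : d.keys.Nodup) (c : List String) (hc : c ∈ d.keys) :
    ((pvAdj d).getD c PySem.Set.empty).Perm (pvNeighbors d (pvProbs d) c) := by
  rw [List.perm_ext_iff_of_nodup (pv_adj_nodup d hnd c) (pv_nodup_neighbors d (pvProbs d) c)]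
  intro x
  rw [pv_mem_adj d hnd, pv_mem_neighbors d hnd]
  constructor
  · rintro (h | ⟨h, -⟩)
    · exact Or.inl h
    · exact Or.inr h
  · rintro (h | h)
    · exact Or.inl h
    · exact Or.inr ⟨h, hc⟩


-- ---- the maintained score dictionary of B ----
lemma pv_contains_add {A : Type} [BEq A] [LawfulBEq A] (s : PySem.Set A) (b x : A) :
    PySem.Set.contains (PySem.Set.add s b) x = (PySem.Set.contains s x || x == b) := by
  by_cases hxm : x ∈ PySem.Set.add s b
  · rw [(PySem.Set.contains_iff _ x).2 hxm]
    rcases (PySem.Set.mem_add s b x).1 hxm with hm | rfl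
    · rw [(PySem.Set.contains_iff s x).2 hm]; rfl
    · simp
  · have h1 : PySem.Set.contains (PySem.Set.add s b) x = false := by
      rw [← Bool.not_eq_true, PySem.Set.contains_iff]; exact hxm
    have h2 : PySem.Set.contains s x = false := by
      rw [← Bool.not_eq_true, PySem.Set.contains_iff]
      exact fun hm => hxm ((PySem.Set.mem_add s b x).2 (Or.inl hm))
    have h3 : (x == b) = false := by
      rw [beq_eq_false_iff_ne]
      exact fun he => hxm ((PySem.Set.mem_add s b x).2 (Or.inr he))
    rw [h1, h2, h3]
    rfl

lemma pv_countP_addSel {A : Type} [BEq A] [LawfulBEq A] (b : A) (s : PySem.Set A)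
    (hb : PySem.Set.contains s b = false) :
    ∀ (l : List A), l.Nodup →
      l.countP (fun n => PySem.Set.contains (PySem.Set.add s b) n) =
        l.countP (fun n => PySem.Set.contains s n) + (if b ∈ l then 1 else 0) := by
  intro l
  induction l with
  | nil => simp
  | cons a t ih =>
    intro hn
    rw [List.countP_cons, List.countP_cons]
    obtain ⟨hat, hnt⟩ := List.nodup_cons.1 hn
    rw [ih hnt, pv_contains_add s b a]
    by_cases hab : a = b
    · rw [hab] at hat ⊢
      have c1 : ((PySem.Set.contains s b || (b == b)) = true) := by simp
      have c2 : ¬ (PySem.Set.contains s b = true) := by rw [hb]; exact Bool.false_ne_true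
      rw [if_neg hat, if_pos c1, if_neg c2, if_pos (List.mem_cons_self ..)]
    · have h1 : (a == b) = false := by rw [beq_eq_false_iff_ne]; exact hab
      have h2 : (b ∈ a :: t) ↔ (b ∈ t) := by
        rw [List.mem_cons]
        exact or_iff_right (fun h => hab h.symm)
      simp only [h1, Bool.or_false]
      by_cases hbt : b ∈ t
      · simp only [if_pos hbt, if_pos (h2.2 hbt)]
        omega
      · simp only [if_neg hbt, if_neg (fun h => hbt (h2.1 h))]
        omega

def pvInv (d : PySem.Dict (List String) (PySem.Dict String Int))
    (selSet : PySem.Set (List String)) (scores : PySem.Dict (List String) Int) : Prop :=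
  ∀ c, scores.getD c 0 =
    (((pvAdj d).getD c PySem.Set.empty).countP (fun n => PySem.Set.contains selSet n) : Int)

lemma pv_scores0_getD (d : PySem.Dict (List String) (PySem.Dict String Int)) (z : List String) :
    (pvScores0 d).getD z 0 = 0 := by
  unfold pvScores0
  have key : ∀ (l : List (List String)) (d0 : PySem.Dict (List String) Int),
      (∀ y, d0.getD y 0 = 0) → ∀ y, (l.foldl (fun d c => d.insert c 0) d0).getD y 0 = 0 := by
    intro l
    induction l with
    | nil => exact fun d0 h => h
    | cons a t ih =>
      intro d0 h y
      rw [List.foldl_cons]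
      apply ih
      intro y'
      rw [PySem.Dict.getD_insert]
      split_ifs
      · rfl
      · exact h y'
  exact key d.keys PySem.Dict.empty (fun y => rfl) z

lemma pv_inv_init (d : PySem.Dict (List String) (PySem.Dict String Int)) :
    pvInv d PySem.Set.empty (pvScores0 d) := by
  intro c
  rw [pv_scores0_getD]
  have : (((pvAdj d).getD c PySem.Set.empty).countP
      (fun n => PySem.Set.contains PySem.Set.empty n)) = 0 := by
    apply List.countP_eq_zero.2
    intro x _
    simp [PySem.Set.empty, PySem.Set.contains]
  rw [this]
  rfl

lemma pv_bump_inv (d : PySem.Dict (List String) (PySem.Dict String Int))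
    (hnd : d.keys.Nodup) {selSet : PySem.Set (List String)}
    {scores : PySem.Dict (List String) Int} (hInv : pvInv d selSet scores)
    (b : List String) (hb : PySem.Set.contains selSet b = false) :
    pvInv d (PySem.Set.add selSet b)
      (pvBump scores ((pvAdj d).getD b PySem.Set.empty)) := by
  intro c
  unfold pvBump
  rw [PySem.Dict.getD_foldl_modify_add_one]
  rw [hInv c]
  rw [pv_countP_addSel b selSet hb _ (pv_adj_nodup d hnd c)]
  have hcnt : (((pvAdj d).getD b PySem.Set.empty).count c) =
      if b ∈ (pvAdj d).getD c PySem.Set.empty then 1 else 0 := by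
    by_cases hm : b ∈ (pvAdj d).getD c PySem.Set.empty
    · rw [if_pos hm]
      exact List.count_eq_one_of_mem (pv_adj_nodup d hnd b)
        ((pv_adj_symm d hnd b c).1 hm)
    · rw [if_neg hm]
      exact List.count_eq_zero.2 (fun h => hm ((pv_adj_symm d hnd b c).2 h))
  rw [hcnt]
  split_ifs <;> push_cast <;> omega

-- ---- the greedy rounds coincide ----
lemma pv_best_eq (d : PySem.Dict (List String) (PySem.Dict String Int))
    (hnd : d.keys.Nodup) (ranked : List (List String))
    (hr : ∀ c ∈ ranked, c ∈ d.keys) {selSet : PySem.Set (List String)}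
    {scores : PySem.Dict (List String) Int} (hInv : pvInv d selSet scores) :
    pvBestA d (pvProbs d) ranked selSet = pvBestB ranked scores selSet := by
  unfold pvBestA pvBestB
  apply PySem.List.foldl_congr_mem
  intro acc x hx
  cases hsel : PySem.Set.contains selSet x with
  | true => simp
  | false =>
    have hscore : ((pvNeighbors d (pvProbs d) x).countP
        (fun n => PySem.Set.contains selSet n) : Int) = scores.getD x 0 := by
      rw [hInv x]
      rw [List.Perm.countP_eq (fun n => PySem.Set.contains selSet n)
        (pv_adj_perm_neighbors d hnd x (hr x hx))]
    simp only [Bool.false_eq_true, if_false]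
    rw [hscore]

lemma pv_bestB_unsel (ranked : List (List String)) (scores : PySem.Dict (List String) Int)
    (selSet : PySem.Set (List String)) :
    ∀ b, (pvBestB ranked scores selSet).1 = some b →
      PySem.Set.contains selSet b = false := by
  unfold pvBestB
  have key : ∀ (l : List (List String)) (acc : Option (List String) × Int),
      (∀ b, acc.1 = some b → PySem.Set.contains selSet b = false) →
      ∀ b, (l.foldl (fun best ctx =>
          if PySem.Set.contains selSet ctx then best
          else if best.2 < scores.getD ctx 0 then (some ctx, scores.getD ctx 0) else best)
        acc).1 = some b → PySem.Set.contains selSet b = false := by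
    intro l
    induction l with
    | nil => exact fun acc h => h
    | cons a t ih =>
      intro acc h
      rw [List.foldl_cons]
      apply ih
      cases hsel : PySem.Set.contains selSet a with
      | true =>
        intro b hb
        apply h
        simpa using hb
      | false =>
        by_cases hlt : acc.2 < scores.getD a 0
        · intro b hb
          simp only [Bool.false_eq_true, if_false, if_pos hlt] at hb
          exact (Option.some_inj.1 hb) ▸ hsel
        · intro b hb
          apply h
          simpa [hlt] using hb
  exact key ranked (none, -1) (by simp)

lemma pv_loop_eq (d : PySem.Dict (List String) (PySem.Dict String Int))
    (hnd : d.keys.Nodup) (ranked : List (List String))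
    (hr : ∀ c ∈ ranked, c ∈ d.keys) :
    ∀ (fuel : Nat) (sel : List (List String)) (selSet : PySem.Set (List String))
      (scores : PySem.Dict (List String) Int), pvInv d selSet scores →
      pvLoopA d (pvProbs d) ranked fuel sel selSet =
        pvLoopB (pvAdj d) ranked fuel sel selSet scores := by
  intro fuel
  induction fuel with
  | zero => intro sel selSet scores _; rfl
  | succ n ih =>
    intro sel selSet scores hInv
    simp only [pvLoopA, pvLoopB]
    rw [pv_best_eq d hnd ranked hr hInv]
    cases hbest : (pvBestB ranked scores selSet).1 with
    | none => rfl
    | some b =>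
      exact ih _ _ _ (pv_bump_inv d hnd hInv b (pv_bestB_unsel ranked scores selSet b hbest))

theorem pv_main : ∀ (frequency : List (List String × List (String × Int))) (k : Int),
    chain_nodes_py frequency k = chain_nodes_py_alt frequency k := by
  intro frequency k
  have hnd : (pvFreq frequency).keys.Nodup := by
    unfold pvFreq
    exact PySem.Dict.nodup_keys_foldl_insert_key frequency (fun p => p.1)
      (fun _ p => pvInnerDict p.2) PySem.Dict.empty (by decide)
  have hr : ∀ c ∈ pvRanked (pvFreq frequency), c ∈ (pvFreq frequency).keys := by
    intro c hcm
    unfold pvRanked at hcm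
    exact (PySem.List.sorted2_perm _ _ _ _).mem_iff.1 hcm
  unfold chain_nodes_py chain_nodes_py_alt
  cases hR : pvRanked (pvFreq frequency) with
  | nil => simp only [hR]
  | cons r0 t =>
    simp only [hR]
    rw [hR] at hr
    have hInv0 : pvInv (pvFreq frequency) (PySem.Set.add PySem.Set.empty r0)
        (pvBump (pvScores0 (pvFreq frequency))
          ((pvAdj (pvFreq frequency)).getD r0 PySem.Set.empty)) :=
      pv_bump_inv _ hnd (pv_inv_init _) r0 rfl
    rw [pv_loop_eq (pvFreq frequency) hnd (r0 :: t) hr ((k - 1).toNat) [r0] _ _ hInv0]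

-- ===== VERDICT (by name: the statement is the Claim_ definition above) =====
theorem chain_nodes_py_spec : Claim_equal_chain_nodes_py := by
  intro frequency k _ _
  unfold Spec_chain_nodes_py
  exact pv_main frequency k
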